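-- pv_equiv track=rewrite | github.com/akeenantexasfcs/thyoptimize | thyoptimize.py | has_adjacent_intervals_in_list
-- ===== SOURCE A (Python) =====
-- INTERVAL_ORDER_11 = ['Jan-Feb', 'Feb-Mar', 'Mar-Apr', 'Apr-May', 'May-Jun',
--                      'Jun-Jul', 'Jul-Aug', 'Aug-Sep', 'Sep-Oct', 'Oct-Nov', 'Nov-Dec']
--
-- def is_adjacent(interval1, interval2):
--     """Check if two intervals are adjacent, with wrap-around"""
--     try:
--         idx1 = INTERVAL_ORDER_11.index(interval1)
--         idx2 = INTERVAL_ORDER_11.index(interval2)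
--     except ValueError:
--         return False
--
--     diff = abs(idx1 - idx2)
--     return diff == 1 or diff == (len(INTERVAL_ORDER_11) - 1)
--
-- def has_adjacent_intervals_in_list(intervals_list):
--     """Check if any intervals in the list are adjacent (excluding Nov-Dec/Jan-Feb wrap)"""
--     for i in range(len(intervals_list)):
--         for j in range(i + 1, len(intervals_list)):
--             interval1 = intervals_list[i]
--             interval2 = intervals_list[j]
--
--             if is_adjacent(interval1, interval2):
--                 # Allow Nov-Dec and Jan-Feb together (wrap-around exception)
--                 if {interval1, interval2} == {'Nov-Dec', 'Jan-Feb'}: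
--                     continue
--                 else:
--                     return True
--     return False
-- ===== SOURCE B (Python) =====
-- INTERVAL_ORDER_11 = ['Jan-Feb', 'Feb-Mar', 'Mar-Apr', 'Apr-May', 'May-Jun',
--                      'Jun-Jul', 'Jul-Aug', 'Aug-Sep', 'Sep-Oct', 'Oct-Nov', 'Nov-Dec']
--
-- INTERVAL_INDEX = {name: i for i, name in enumerate(INTERVAL_ORDER_11)}
--
--
-- def has_adjacent_intervals_in_list(intervals_list):
--     """Check if any intervals in the list are adjacent (excluding Nov-Dec/Jan-Feb wrap)"""
--     idxs = {INTERVAL_INDEX[s] for s in intervals_list if s in INTERVAL_INDEX}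
--     return any(k + 1 in idxs for k in idxs)
-- ===== Notes on version B (the rewrite author's own statement) =====
-- stated objective: faster
-- what changed: Replaced the all-pairs nested loop with repeated list.index calls by a single pass that collects the set of interval indices via a precomputed dict and then checks whether any two consecutive indices are both present (the Nov-Dec/Jan-Feb wrap pair is never adjacent once the exception is applied, so only the +1 check remains).
import Mathlib
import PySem

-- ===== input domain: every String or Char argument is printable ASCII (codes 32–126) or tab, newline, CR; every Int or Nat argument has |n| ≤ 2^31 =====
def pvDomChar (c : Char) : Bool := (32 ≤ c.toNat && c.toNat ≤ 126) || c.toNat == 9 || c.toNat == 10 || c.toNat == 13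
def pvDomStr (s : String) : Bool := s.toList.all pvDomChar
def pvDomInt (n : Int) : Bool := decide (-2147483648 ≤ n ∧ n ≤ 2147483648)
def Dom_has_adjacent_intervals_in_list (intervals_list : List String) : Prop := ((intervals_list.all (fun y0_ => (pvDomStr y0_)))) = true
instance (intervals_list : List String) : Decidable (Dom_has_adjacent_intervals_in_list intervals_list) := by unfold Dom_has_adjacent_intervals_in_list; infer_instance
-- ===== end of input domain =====

-- B replaces A's all-pairs nested scan (quadratic, with repeated list.index calls) by one pass
-- collecting the set of interval indices through a precomputed dict and a consecutive-index check.

-- ===== PORT A =====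
def INTERVAL_ORDER_11 : List String :=
  ["Jan-Feb", "Feb-Mar", "Mar-Apr", "Apr-May", "May-Jun",
   "Jun-Jul", "Jul-Aug", "Aug-Sep", "Sep-Oct", "Oct-Nov", "Nov-Dec"]

def is_adjacent (interval1 interval2 : String) : Bool :=
  match PySem.List.index? INTERVAL_ORDER_11 interval1,
        PySem.List.index? INTERVAL_ORDER_11 interval2 with
  | some idx1, some idx2 =>
      -- diff = abs(idx1 - idx2); return diff == 1 or diff == len - 1
      let diff := ((idx1 : Int) - (idx2 : Int)).natAbs
      diff == 1 || diff == (INTERVAL_ORDER_11.length - 1)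
  | _, _ => false  -- except ValueError: return False

def has_adjacent_intervals_in_list (intervals_list : List String) : Bool :=
  -- for i in range(len): for j in range(i+1, len): early 'return True' / 'continue' = nested any
  (PySem.List.pyRange 0 (intervals_list.length : Int) 1).any (fun i =>
    (PySem.List.pyRange (i + 1) (intervals_list.length : Int) 1).any (fun j =>
      -- indices produced by the ranges are always in bounds, so pyGetD is exact here
      let interval1 := PySem.List.pyGetD intervals_list i ""
      let interval2 := PySem.List.pyGetD intervals_list j ""
      is_adjacent interval1 interval2 &&
        !(PySem.Set.equal (PySem.Set.ofList [interval1, interval2])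
                          (PySem.Set.ofList ["Nov-Dec", "Jan-Feb"]))))

-- ===== PORT B =====
def INTERVAL_INDEX : PySem.Dict String Int :=
  (PySem.List.enumerate INTERVAL_ORDER_11 0).foldl
    (fun d p => d.insert p.2 p.1) PySem.Dict.empty

def has_adjacent_intervals_in_list_alt (intervals_list : List String) : Bool :=
  -- idxs = {INTERVAL_INDEX[s] for s in intervals_list if s in INTERVAL_INDEX}
  let idxs : PySem.Set Int :=
    intervals_list.foldl
      (fun s x => if INTERVAL_INDEX.contains x
                  then PySem.Set.add s (INTERVAL_INDEX.getD x 0) else s)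
      PySem.Set.empty
  -- any(k + 1 in idxs for k in idxs)
  idxs.any (fun k => PySem.Set.contains idxs (k + 1))

-- ===== PRECONDITION & SPEC =====
def Spec_has_adjacent_intervals_in_list (intervals_list : List String) (out : Bool) : Prop := out = has_adjacent_intervals_in_list_alt intervals_list
instance (intervals_list : List String) (out : Bool) : Decidable (Spec_has_adjacent_intervals_in_list intervals_list out) := by unfold Spec_has_adjacent_intervals_in_list; infer_instance

-- ===== CLAIM (what is proved, stated in full; the proofs are below) =====
def Claim_equal_has_adjacent_intervals_in_list : Prop := ∀ (intervals_list : List String), Dom_has_adjacent_intervals_in_list intervals_list → Spec_has_adjacent_intervals_in_list intervals_list (has_adjacent_intervals_in_list intervals_list)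

-- ===== LEMMAS AND PROOFS =====

-- the interval's position in the calendar order, if present
def pvIdx (s : String) : Option Nat := PySem.List.index? INTERVAL_ORDER_11 s

-- "s and t are at consecutive calendar positions (t right after s)"
def pvConsec (s t : String) : Prop := ∃ a : Nat, pvIdx s = some a ∧ pvIdx t = some (a + 1)

-- the body of A's inner loop as a named predicate
def pvPair (s t : String) : Bool :=
  is_adjacent s t &&
    !(PySem.Set.equal (PySem.Set.ofList [s, t]) (PySem.Set.ofList ["Nov-Dec", "Jan-Feb"]))

lemma pvIdx_bound {s : String} {a : Nat} (h : pvIdx s = some a) :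
    a < 11 ∧ s = INTERVAL_ORDER_11.getD a "" := by
  obtain ⟨hk, hs, -⟩ := PySem.List.getElem_of_index?_eq_some h
  refine ⟨by simpa [INTERVAL_ORDER_11] using hk, ?_⟩
  rw [List.getD_eq_getElem _ _ hk, hs]

-- the finite core: on actual calendar intervals, A's pair test holds iff the indices are consecutive
lemma pvPair_table : ∀ a < 11, ∀ b < 11,
    (pvPair (INTERVAL_ORDER_11.getD a "") (INTERVAL_ORDER_11.getD b "") = true ↔
      (b = a + 1 ∨ a = b + 1)) := by decide

lemma pvPair_some {s t : String} (h : pvPair s t = true) :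
    ∃ a b, pvIdx s = some a ∧ pvIdx t = some b := by
  unfold pvPair is_adjacent at h
  unfold pvIdx
  rcases ha : PySem.List.index? INTERVAL_ORDER_11 s with _ | a <;> rw [ha] at h <;>
    rcases hb : PySem.List.index? INTERVAL_ORDER_11 t with _ | b <;> rw [hb] at h
  · simp at h
  · simp at h
  · simp at h
  · exact ⟨a, b, rfl, rfl⟩

lemma pvPair_iff (s t : String) : pvPair s t = true ↔ (pvConsec s t ∨ pvConsec t s) := by
  constructor
  · intro h
    obtain ⟨a, b, ha, hb⟩ := pvPair_some h
    obtain ⟨ha1, hs⟩ := pvIdx_bound ha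
    obtain ⟨hb1, ht⟩ := pvIdx_bound hb
    have := (pvPair_table a ha1 b hb1).mp (by rwa [← hs, ← ht])
    rcases this with h1 | h1
    · exact Or.inl ⟨a, ha, by rw [hb, h1]⟩
    · exact Or.inr ⟨b, hb, by rw [ha, h1]⟩
  · intro h
    rcases h with ⟨a, ha, hb⟩ | ⟨a, ha, hb⟩
    · obtain ⟨ha1, hs⟩ := pvIdx_bound ha
      obtain ⟨hb1, ht⟩ := pvIdx_bound hb
      have := (pvPair_table a ha1 (a + 1) hb1).mpr (Or.inl rfl)
      rwa [← hs, ← ht] at this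
    · obtain ⟨ha1, hs⟩ := pvIdx_bound ha
      obtain ⟨hb1, ht⟩ := pvIdx_bound hb
      have := (pvPair_table (a + 1) hb1 a ha1).mpr (Or.inr rfl)
      rwa [← ht, ← hs] at this

lemma pvA_iff (l : List String) :
    has_adjacent_intervals_in_list l = true ↔ ∃ s ∈ l, ∃ t ∈ l, pvConsec s t := by
  unfold has_adjacent_intervals_in_list
  rw [List.any_eq_true]
  constructor
  · rintro ⟨i, hi, hin⟩
    rw [List.any_eq_true] at hin
    obtain ⟨j, hj, hp⟩ := hin
    rw [PySem.List.mem_pyRange_one] at hi hj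
    have hi' : PySem.List.pyGetD l i "" = l[i.toNat]'(by omega) := by
      rw [PySem.List.pyGetD_eq_getElem] <;> omega
    have hj' : PySem.List.pyGetD l j "" = l[j.toNat]'(by omega) := by
      rw [PySem.List.pyGetD_eq_getElem] <;> omega
    have hp' : pvPair (l[i.toNat]'(by omega)) (l[j.toNat]'(by omega)) = true := by
      rw [← hi', ← hj']; exact hp
    rcases (pvPair_iff _ _).mp hp' with h | h
    · exact ⟨_, List.getElem_mem _, _, List.getElem_mem _, h⟩
    · exact ⟨_, List.getElem_mem _, _, List.getElem_mem _, h⟩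
  · rintro ⟨s, hs, t, ht, hc⟩
    have hst : s ≠ t := by
      rintro rfl
      obtain ⟨a, h1, h2⟩ := hc
      rw [h1] at h2; simp at h2
    obtain ⟨i, hi, hie⟩ := List.mem_iff_getElem.mp hs
    obtain ⟨j, hj, hje⟩ := List.mem_iff_getElem.mp ht
    have hij : i ≠ j := by rintro rfl; exact hst (hie.symm.trans hje)
    -- use the smaller position first; pvPair holds in both orders
    rcases Nat.lt_or_lt_of_ne hij with hlt | hlt
    · refine ⟨(i : Int), by rw [PySem.List.mem_pyRange_one]; constructor <;> omega, ?_⟩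
      rw [List.any_eq_true]
      refine ⟨(j : Int), by rw [PySem.List.mem_pyRange_one]; constructor <;> omega, ?_⟩
      have hi' : PySem.List.pyGetD l (i : Int) "" = s := by
        rw [PySem.List.pyGetD_eq_getElem] <;> simp [hi, hie]
      have hj' : PySem.List.pyGetD l (j : Int) "" = t := by
        rw [PySem.List.pyGetD_eq_getElem] <;> simp [hj, hje]
      rw [hi', hj']
      exact (pvPair_iff s t).mpr (Or.inl hc)
    · refine ⟨(j : Int), by rw [PySem.List.mem_pyRange_one]; constructor <;> omega, ?_⟩
      rw [List.any_eq_true]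
      refine ⟨(i : Int), by rw [PySem.List.mem_pyRange_one]; constructor <;> omega, ?_⟩
      have hi' : PySem.List.pyGetD l (i : Int) "" = s := by
        rw [PySem.List.pyGetD_eq_getElem] <;> simp [hi, hie]
      have hj' : PySem.List.pyGetD l (j : Int) "" = t := by
        rw [PySem.List.pyGetD_eq_getElem] <;> simp [hj, hje]
      rw [hi', hj']
      exact (pvPair_iff t s).mpr (Or.inr hc)

-- B's dict agrees with A's list.index
lemma pvIndexMap (s : String) :
    INTERVAL_INDEX.get? s = Option.map Int.ofNat (pvIdx s) := by
  have hlit : INTERVAL_INDEX = PySem.Dict.mk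
      [("Jan-Feb", 0), ("Feb-Mar", 1), ("Mar-Apr", 2), ("Apr-May", 3), ("May-Jun", 4),
       ("Jun-Jul", 5), ("Jul-Aug", 6), ("Aug-Sep", 7), ("Sep-Oct", 8), ("Oct-Nov", 9),
       ("Nov-Dec", 10)] := by decide
  by_cases h0 : s = "Jan-Feb"; · subst h0; decide
  by_cases h1 : s = "Feb-Mar"; · subst h1; decide
  by_cases h2 : s = "Mar-Apr"; · subst h2; decide
  by_cases h3 : s = "Apr-May"; · subst h3; decide
  by_cases h4 : s = "May-Jun"; · subst h4; decide
  by_cases h5 : s = "Jun-Jul"; · subst h5; decide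
  by_cases h6 : s = "Jul-Aug"; · subst h6; decide
  by_cases h7 : s = "Aug-Sep"; · subst h7; decide
  by_cases h8 : s = "Sep-Oct"; · subst h8; decide
  by_cases h9 : s = "Oct-Nov"; · subst h9; decide
  by_cases h10 : s = "Nov-Dec"; · subst h10; decide
  rw [hlit]
  simp [PySem.Dict.get?, pvIdx, INTERVAL_ORDER_11,
        List.idxOf?, List.findIdx?_cons, List.findIdx?_nil,
        Ne.symm h0, Ne.symm h1, Ne.symm h2, Ne.symm h3, Ne.symm h4, Ne.symm h5,
        Ne.symm h6, Ne.symm h7, Ne.symm h8, Ne.symm h9, Ne.symm h10]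

lemma pvFold_mem (l : List String) (acc : PySem.Set Int) (x : Int) :
    x ∈ l.foldl (fun s y => if INTERVAL_INDEX.contains y
                  then PySem.Set.add s (INTERVAL_INDEX.getD y 0) else s) acc ↔
      x ∈ acc ∨ ∃ s ∈ l, INTERVAL_INDEX.get? s = some x := by
  induction l generalizing acc with
  | nil => simp
  | cons a l ih =>
    rw [List.foldl_cons, ih]
    by_cases hc : INTERVAL_INDEX.contains a = true
    · obtain ⟨v, hv⟩ : ∃ v, INTERVAL_INDEX.get? a = some v := by
        rw [PySem.Dict.contains_eq_isSome_get?] at hc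
        exact Option.isSome_iff_exists.mp hc
      have hg : INTERVAL_INDEX.getD a 0 = v := by
        rw [PySem.Dict.getD_eq_get?_getD, hv]; rfl
      rw [if_pos hc, hg, PySem.Set.mem_add]
      simp only [List.mem_cons]
      constructor
      · rintro ((h | rfl) | h)
        · exact Or.inl h
        · exact Or.inr ⟨a, Or.inl rfl, hv⟩
        · obtain ⟨s, hs, he⟩ := h; exact Or.inr ⟨s, Or.inr hs, he⟩
      · rintro (h | ⟨s, (rfl | hs), he⟩)
        · exact Or.inl (Or.inl h)
        · rw [hv] at he; exact Or.inl (Or.inr (Option.some_injective _ he).symm)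
        · exact Or.inr ⟨s, hs, he⟩
    · have hn : INTERVAL_INDEX.get? a = none := by
        rw [PySem.Dict.contains_eq_isSome_get?] at hc
        simpa using hc
      rw [if_neg hc]
      simp only [List.mem_cons]
      constructor
      · rintro (h | ⟨s, hs, he⟩)
        · exact Or.inl h
        · exact Or.inr ⟨s, Or.inr hs, he⟩
      · rintro (h | ⟨s, (rfl | hs), he⟩)
        · exact Or.inl h
        · rw [hn] at he; cases he
        · exact Or.inr ⟨s, hs, he⟩

lemma pvB_iff (l : List String) :
    has_adjacent_intervals_in_list_alt l = true ↔ ∃ s ∈ l, ∃ t ∈ l, pvConsec s t := by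
  unfold has_adjacent_intervals_in_list_alt
  rw [List.any_eq_true]
  constructor
  · rintro ⟨k, hk, hk1⟩
    rw [PySem.Set.contains_iff] at hk1
    rw [pvFold_mem] at hk hk1
    simp only [PySem.Set.empty, List.not_mem_nil, false_or] at hk hk1
    obtain ⟨s, hs, hes⟩ := hk
    obtain ⟨t, ht, het⟩ := hk1
    rw [pvIndexMap] at hes het
    obtain ⟨a, ha, hak⟩ := Option.map_eq_some_iff.mp hes
    obtain ⟨b, hb, hbk⟩ := Option.map_eq_some_iff.mp het
    have hba : b = a + 1 := by
      simp only [Int.ofNat_eq_natCast] at hak hbk; omega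
    refine ⟨s, hs, t, ht, ?_⟩
    exact ⟨a, ha, by rw [hb, hba]⟩
  · rintro ⟨s, hs, t, ht, a, ha, hb⟩
    refine ⟨(a : Int), ?_, ?_⟩
    · rw [pvFold_mem]
      exact Or.inr ⟨s, hs, by rw [pvIndexMap, ha]; rfl⟩
    · rw [PySem.Set.contains_iff, pvFold_mem]
      refine Or.inr ⟨t, ht, ?_⟩
      rw [pvIndexMap, hb]
      exact congrArg some (by simp)

-- ===== VERDICT (by name: the statement is the Claim_ definition above) =====
theorem has_adjacent_intervals_in_list_spec : Claim_equal_has_adjacent_intervals_in_list := by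
  intro l _
  unfold Spec_has_adjacent_intervals_in_list
  rw [Bool.eq_iff_iff, pvA_iff, pvB_iff]
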